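-- pv_equiv track=rewrite | github.com/shoark7/algorithm-with-python | problems_solving/baekjoon/lightbulb.py | min_count
-- ===== SOURCE A (Python) =====
-- def min_count(arr):
--     N = len(arr)
--     cache = [[-1 for _ in range(N)] for _ in range(N)]
--
--     def get(lo, hi):
--         if lo == hi:
--             return 0
--         elif cache[lo][hi] != -1:
--             return cache[lo][hi]
--
--         if hi > 0 and arr[hi] == arr[hi-1]:
--             ret = get(lo, hi-1)
--         elif lo + 1 < N and arr[lo] == arr[lo+1]:
--             ret = get(lo+1, hi)
--         else:
--             ret = 9999
--             for k in range(lo, hi):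
--                 ret = min(ret, get(lo, k) + get(k+1, hi) + (arr[lo] != arr[k+1]))
--
--         cache[lo][hi] = ret
--         return ret
--
--     return get(0, N-1)
-- ===== SOURCE B (Python) =====
-- def min_count(arr):
--     N = len(arr)
--     cache = {}
--     for i in range(N):
--         cache[i, i] = 0
--     for L in range(1, N):
--         for lo in range(N - L):
--             hi = lo + L
--             if arr[hi] == arr[hi - 1]:
--                 ret = cache[lo, hi - 1]
--             elif arr[lo] == arr[lo + 1]:
--                 ret = cache[lo + 1, hi]
--             else:
--                 ret = min(cache[lo, k] + cache[k + 1, hi] + (arr[lo] != arr[k + 1])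
--                           for k in range(lo, hi))
--                 ret = min(ret, 9999)
--             cache[lo, hi] = ret
--     return cache[0, N - 1]
-- ===== Notes on version B (the rewrite author's own statement) =====
-- stated objective: alternative
-- what changed: Replaces A's top-down memoized recursion (closure over an N x N sentinel cache) by a bottom-up interval DP that fills a dict keyed (lo, hi) in order of increasing interval length with the identical recurrence and branch precedence.
import Mathlib
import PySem

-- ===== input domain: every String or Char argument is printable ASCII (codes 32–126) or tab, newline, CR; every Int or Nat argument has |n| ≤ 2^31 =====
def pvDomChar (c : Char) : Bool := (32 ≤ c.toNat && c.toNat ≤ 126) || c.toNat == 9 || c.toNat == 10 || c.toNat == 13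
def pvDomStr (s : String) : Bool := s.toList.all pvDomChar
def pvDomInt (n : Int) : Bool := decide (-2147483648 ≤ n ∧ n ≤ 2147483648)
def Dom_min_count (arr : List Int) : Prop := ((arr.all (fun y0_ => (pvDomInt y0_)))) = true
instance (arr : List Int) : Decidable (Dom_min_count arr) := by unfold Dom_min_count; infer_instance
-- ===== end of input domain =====

-- B replaces A's top-down memoized recursion by a bottom-up interval DP over a dict keyed by
-- (lo, hi), filled in order of increasing interval length; same recurrence, different traversal.

-- ===== PORT A =====
-- A's memo table: N×N list of lists, -1 = "not computed".  cGet/cSet are cache[lo][hi] reads/writes.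
def cGet (c : List (List Int)) (lo hi : Nat) : Int := (c.getD lo []).getD hi (-1)
def cSet (c : List (List Int)) (lo hi : Nat) (v : Int) : List (List Int) :=
  c.set lo ((c.getD lo []).set hi v)

-- get(lo, hi) threading the cache through the recursion and the k-loop; fuel only makes the
-- recursion structural (fuel = N suffices: every recursive call shrinks the interval).
-- All arr indices are in range on reachable calls, so getD is exact there.
def mcGet (arr : List Int) (N : Nat) : Nat → Nat → Nat → List (List Int) → Int × List (List Int)
  | 0, _, _, c => (0, c)
  | Nat.succ f, lo, hi, c =>
    if lo = hi then (0, c)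
    else if cGet c lo hi ≠ -1 then (cGet c lo hi, c)
    else
      let st :=
        if 0 < hi ∧ arr.getD hi 0 = arr.getD (hi - 1) 0 then
          mcGet arr N f lo (hi - 1) c
        else if lo + 1 < N ∧ arr.getD lo 0 = arr.getD (lo + 1) 0 then
          mcGet arr N f (lo + 1) hi c
        else
          (List.range' lo (hi - lo)).foldl
            (fun st k =>
              let p1 := mcGet arr N f lo k st.2
              let p2 := mcGet arr N f (k + 1) hi p1.2
              (min st.1 (p1.1 + p2.1 +
                (if arr.getD lo 0 ≠ arr.getD (k + 1) 0 then (1 : Int) else 0)), p2.2))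
            ((9999 : Int), c)
      (st.1, cSet st.2 lo hi st.1)

def min_count (arr : List Int) : Int :=
  let N := arr.length
  (mcGet arr N N 0 (N - 1) (List.replicate N (List.replicate N (-1)))).1

-- ===== PORT B =====
-- Bottom-up interval DP (Source B): dict keyed (lo, hi); diagonal first, then lengths 1..N-1.
-- The dict lookups cache[lo, k] hit keys that are always present, so getD is exact; the final
-- cache[0, N-1] raises KeyError only for N = 0, which Pre_ excludes.
def min_count_alt (arr : List Int) : Int :=
  let N := arr.length
  let d0 : PySem.Dict (Nat × Nat) Int :=
    (List.range N).foldl (fun d i => d.insert (i, i) 0) PySem.Dict.empty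
  let d :=
    (List.range' 1 (N - 1)).foldl (fun d L =>
      (List.range (N - L)).foldl (fun d lo =>
        let hi := lo + L
        let ret :=
          if arr.getD hi 0 = arr.getD (hi - 1) 0 then d.getD (lo, hi - 1) 0
          else if arr.getD lo 0 = arr.getD (lo + 1) 0 then d.getD (lo + 1, hi) 0
          else
            let ts := (List.range' lo (hi - lo)).map (fun k =>
              d.getD (lo, k) 0 + d.getD (k + 1, hi) 0 +
                (if arr.getD lo 0 ≠ arr.getD (k + 1) 0 then (1 : Int) else 0))
            min ((PySem.List.min? ts (fun y => y)).getD 0) 9999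
        d.insert (lo, hi) ret) d) d0
  d.getD (0, N - 1) 0

-- ===== PRECONDITION & SPEC =====
-- Pre_ excludes only the empty list, on which A raises IndexError (and B raises KeyError).
def Pre_min_count (arr : List Int) : Prop := arr ≠ []
instance (arr : List Int) : Decidable (Pre_min_count arr) := by unfold Pre_min_count; infer_instance
def pvWitness_min_count : List Int := [1, 2, 1]

def Spec_min_count (arr : List Int) (out : Int) : Prop := out = min_count_alt arr
instance (arr : List Int) (out : Int) : Decidable (Spec_min_count arr out) := by unfold Spec_min_count; infer_instance

-- ===== CLAIM (what is proved, stated in full; the proofs are below) =====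
def Claim_equal_min_count : Prop :=
  ∀ (arr : List Int), Dom_min_count arr → Pre_min_count arr → Spec_min_count arr (min_count arr)

-- ===== LEMMAS AND PROOFS =====

-- Pure (cache-free, fueled) value of get(lo, hi); both ports are proved equal to it.
def gRec (arr : List Int) (N : Nat) : Nat → Nat → Nat → Int
  | 0, _, _ => 0
  | Nat.succ f, lo, hi =>
    if lo = hi then 0
    else if 0 < hi ∧ arr.getD hi 0 = arr.getD (hi - 1) 0 then gRec arr N f lo (hi - 1)
    else if lo + 1 < N ∧ arr.getD lo 0 = arr.getD (lo + 1) 0 then gRec arr N f (lo + 1) hi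
    else
      (List.range' lo (hi - lo)).foldl
        (fun acc k => min acc (gRec arr N f lo k + gRec arr N f (k + 1) hi +
          (if arr.getD lo 0 ≠ arr.getD (k + 1) 0 then (1 : Int) else 0))) 9999

lemma gRec_fuel (arr : List Int) (N : Nat) :
    ∀ f f' lo hi, lo ≤ hi → hi - lo < f → hi - lo < f' →
      gRec arr N f lo hi = gRec arr N f' lo hi := by
  intro f
  induction f with
  | zero => intro f' lo hi _ h; omega
  | succ f ih =>
    intro f' lo hi hlh h h'
    obtain ⟨f'', rfl⟩ : ∃ f'', f' = f'' + 1 := ⟨f' - 1, by omega⟩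
    simp only [gRec]
    by_cases h1 : lo = hi
    · simp [h1]
    · simp only [if_neg h1]
      by_cases h2 : 0 < hi ∧ arr.getD hi 0 = arr.getD (hi - 1) 0
      · simp only [if_pos h2]; exact ih f'' lo (hi - 1) (by omega) (by omega) (by omega)
      · simp only [if_neg h2]
        by_cases h3 : lo + 1 < N ∧ arr.getD lo 0 = arr.getD (lo + 1) 0
        · simp only [if_pos h3]; exact ih f'' (lo + 1) hi (by omega) (by omega) (by omega)
        · simp only [if_neg h3]
          refine PySem.List.foldl_congr_mem _ _ _ _ ?_
          intro acc k hk
          rw [List.mem_range'] at hk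
          rw [ih f'' lo k (by omega) (by omega) (by omega),
              ih f'' (k + 1) hi (by omega) (by omega) (by omega)]

-- the true value of get(lo, hi) (fuel large enough)
def Gn (arr : List Int) (N : Nat) (lo hi : Nat) : Int := gRec arr N (hi - lo + 1) lo hi

lemma Gn_eq (arr : List Int) (N : Nat) (lo hi : Nat) (hlh : lo ≤ hi) :
    Gn arr N lo hi =
      if lo = hi then 0
      else if 0 < hi ∧ arr.getD hi 0 = arr.getD (hi - 1) 0 then Gn arr N lo (hi - 1)
      else if lo + 1 < N ∧ arr.getD lo 0 = arr.getD (lo + 1) 0 then Gn arr N (lo + 1) hi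
      else
        (List.range' lo (hi - lo)).foldl
          (fun acc k => min acc (Gn arr N lo k + Gn arr N (k + 1) hi +
            (if arr.getD lo 0 ≠ arr.getD (k + 1) 0 then (1 : Int) else 0))) 9999 := by
  show gRec arr N (hi - lo + 1) lo hi = _
  simp only [gRec]
  by_cases h1 : lo = hi
  · simp [h1]
  · simp only [if_neg h1]
    by_cases h2 : 0 < hi ∧ arr.getD hi 0 = arr.getD (hi - 1) 0
    · simp only [if_pos h2]
      exact gRec_fuel arr N _ _ lo (hi - 1) (by omega) (by omega) (by omega)
    · simp only [if_neg h2]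
      by_cases h3 : lo + 1 < N ∧ arr.getD lo 0 = arr.getD (lo + 1) 0
      · simp only [if_pos h3]
        exact gRec_fuel arr N _ _ (lo + 1) hi (by omega) (by omega) (by omega)
      · simp only [if_neg h3]
        refine PySem.List.foldl_congr_mem _ _ _ _ ?_
        intro acc k hk
        rw [List.mem_range'] at hk
        rw [gRec_fuel arr N _ (k - lo + 1) lo k (by omega) (by omega) (by omega),
            gRec_fuel arr N _ (hi - (k + 1) + 1) (k + 1) hi (by omega) (by omega) (by omega)]
        rfl

-- ---------- A-side: the memo cache only ever stores correct values ----------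
def CInv (arr : List Int) (N : Nat) (c : List (List Int)) : Prop :=
  ∀ lo hi, cGet c lo hi ≠ -1 → cGet c lo hi = Gn arr N lo hi

lemma cGet_cSet (c : List (List Int)) (lo hi : Nat) (v : Int) (lo' hi' : Nat) :
    cGet (cSet c lo hi v) lo' hi' = cGet c lo' hi' ∨
      (lo' = lo ∧ hi' = hi ∧ cGet (cSet c lo hi v) lo' hi' = v) := by
  by_cases hl : lo = lo'
  · subst hl
    by_cases hlr : lo < c.length
    · by_cases hh : hi = hi'
      · subst hh
        by_cases hhr : hi < (c.getD lo []).length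
        · refine Or.inr ⟨rfl, rfl, ?_⟩
          have hhr' : hi < ((getElem? c lo).getD []).length := by
            simpa [List.getD_eq_getElem?_getD] using hhr
          have hc : hi < (getElem c lo hlr).length := by
            rwa [List.getD_eq_getElem c [] hlr] at hhr
          unfold cGet cSet
          simp [List.getD_eq_getElem?_getD, hlr, hc]
        · refine Or.inl ?_
          unfold cGet cSet
          rw [show (c.getD lo []).set hi v = c.getD lo [] from
                List.set_eq_of_length_le (by omega),
              List.getD_eq_getElem c [] hlr, List.set_getElem_self hlr,
              List.getD_eq_getElem c [] hlr]
      · refine Or.inl ?_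
        unfold cGet cSet
        simp [List.getD_eq_getElem?_getD, hlr, hh]
    · refine Or.inl ?_
      unfold cGet cSet
      rw [List.set_eq_of_length_le (by omega)]
  · refine Or.inl ?_
    unfold cGet cSet
    simp only [List.getD_eq_getElem?_getD, List.getElem?_set, if_neg hl]

lemma CInv_cSet (arr : List Int) (N : Nat) (c : List (List Int)) (lo hi : Nat) (v : Int)
    (hc : CInv arr N c) (hv : Gn arr N lo hi = v) : CInv arr N (cSet c lo hi v) := by
  intro lo' hi' hne
  rcases cGet_cSet c lo hi v lo' hi' with h | ⟨rfl, rfl, h⟩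
  · rw [h] at hne ⊢; exact hc lo' hi' hne
  · rw [h, hv]

lemma mcGet_correct (arr : List Int) (N : Nat) :
    ∀ f lo hi c, lo ≤ hi → hi - lo < f → CInv arr N c →
      (mcGet arr N f lo hi c).1 = Gn arr N lo hi ∧ CInv arr N (mcGet arr N f lo hi c).2 := by
  intro f
  induction f with
  | zero => intro lo hi c _ h; omega
  | succ f ih =>
    intro lo hi c hlh h hc
    simp only [mcGet]
    by_cases h1 : lo = hi
    · simp only [if_pos h1]
      exact ⟨by rw [Gn_eq arr N lo hi hlh, if_pos h1], hc⟩
    · simp only [if_neg h1]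
      by_cases hcached : cGet c lo hi ≠ -1
      · simp only [if_pos hcached]
        exact ⟨hc lo hi hcached, hc⟩
      · simp only [if_neg hcached]
        by_cases h2 : 0 < hi ∧ arr.getD hi 0 = arr.getD (hi - 1) 0
        · simp only [if_pos h2]
          have hpos : 0 < hi := h2.1
          obtain ⟨he, hinv⟩ := ih lo (hi - 1) c (by omega) (by omega) hc
          have hg : Gn arr N lo hi = (mcGet arr N f lo (hi - 1) c).1 := by
            rw [Gn_eq arr N lo hi hlh, if_neg h1, if_pos h2, he]
          exact ⟨hg.symm, CInv_cSet arr N _ lo hi _ hinv hg⟩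
        · simp only [if_neg h2]
          by_cases h3 : lo + 1 < N ∧ arr.getD lo 0 = arr.getD (lo + 1) 0
          · simp only [if_pos h3]
            obtain ⟨he, hinv⟩ := ih (lo + 1) hi c (by omega) (by omega) hc
            have hg : Gn arr N lo hi = (mcGet arr N f (lo + 1) hi c).1 := by
              rw [Gn_eq arr N lo hi hlh, if_neg h1, if_neg h2, if_pos h3, he]
            exact ⟨hg.symm, CInv_cSet arr N _ lo hi _ hinv hg⟩
          · simp only [if_neg h3]
            have fold :
                ∀ (ks : List Nat),
                  (∀ k ∈ ks, lo ≤ k ∧ k - lo < f ∧ k + 1 ≤ hi ∧ hi - (k + 1) < f) →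
                ∀ (acc : Int) (c' : List (List Int)), CInv arr N c' →
                  (ks.foldl
                    (fun st k =>
                      let p1 := mcGet arr N f lo k st.2
                      let p2 := mcGet arr N f (k + 1) hi p1.2
                      (min st.1 (p1.1 + p2.1 +
                        (if arr.getD lo 0 ≠ arr.getD (k + 1) 0 then (1 : Int) else 0)), p2.2))
                    (acc, c')).1 =
                    ks.foldl (fun acc k => min acc (Gn arr N lo k + Gn arr N (k + 1) hi +
                      (if arr.getD lo 0 ≠ arr.getD (k + 1) 0 then (1 : Int) else 0))) acc ∧
                  CInv arr N
                    (ks.foldl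
                      (fun st k =>
                        let p1 := mcGet arr N f lo k st.2
                        let p2 := mcGet arr N f (k + 1) hi p1.2
                        (min st.1 (p1.1 + p2.1 +
                          (if arr.getD lo 0 ≠ arr.getD (k + 1) 0 then (1 : Int) else 0)), p2.2))
                      (acc, c')).2 := by
              intro ks
              induction ks with
              | nil => intro _ acc c' hc'; exact ⟨rfl, hc'⟩
              | cons k ks ihk =>
                intro hks acc c' hc'
                obtain ⟨hk0, hk1, hk2, hk3⟩ := hks k List.mem_cons_self
                obtain ⟨e1, i1⟩ := ih lo k c' hk0 hk1 hc'
                obtain ⟨e2, i2⟩ := ih (k + 1) hi _ hk2 hk3 i1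
                simp only [List.foldl_cons]
                have hrest := ihk (fun k hk => hks k (List.mem_cons_of_mem _ hk))
                  (min acc (Gn arr N lo k + Gn arr N (k + 1) hi +
                    (if arr.getD lo 0 ≠ arr.getD (k + 1) 0 then (1 : Int) else 0))) _ i2
                simpa [e1, e2] using hrest
            have hks : ∀ k ∈ List.range' lo (hi - lo),
                lo ≤ k ∧ k - lo < f ∧ k + 1 ≤ hi ∧ hi - (k + 1) < f := by
              intro k hk
              rw [List.mem_range'] at hk
              omega
            obtain ⟨e, i⟩ := fold (List.range' lo (hi - lo)) hks 9999 c hc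
            have hg : Gn arr N lo hi =
                (List.foldl
                  (fun st k =>
                    let p1 := mcGet arr N f lo k st.2
                    let p2 := mcGet arr N f (k + 1) hi p1.2
                    (min st.1 (p1.1 + p2.1 +
                      (if arr.getD lo 0 ≠ arr.getD (k + 1) 0 then (1 : Int) else 0)), p2.2))
                  ((9999 : Int), c) (List.range' lo (hi - lo))).1 := by
              rw [Gn_eq arr N lo hi hlh, if_neg h1, if_neg h2, if_neg h3, e]
            exact ⟨hg.symm, CInv_cSet arr N _ lo hi _ i hg⟩

lemma CInv_init (arr : List Int) (N M : Nat) :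
    CInv arr N (List.replicate M (List.replicate M (-1))) := by
  intro lo hi hne
  exfalso
  apply hne
  unfold cGet
  simp only [List.getD_eq_getElem?_getD, List.getElem?_replicate]
  split_ifs <;> simp

lemma min_count_eq_Gn (arr : List Int) (h : arr ≠ []) :
    min_count arr = Gn arr arr.length 0 (arr.length - 1) := by
  have hN : 0 < arr.length := List.length_pos_iff.mpr h
  unfold min_count
  exact (mcGet_correct arr arr.length arr.length 0 (arr.length - 1)
    _ (by omega) (by omega) (CInv_init arr arr.length arr.length)).1

-- ---------- B-side: the bottom-up table agrees with Gn on every filled interval ----------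
lemma foldl_min_comm (f : Nat → Int) : ∀ (t : List Nat) (a z : Int),
    t.foldl (fun acc k => min acc (f k)) (min a z) =
      min a (t.foldl (fun acc k => min acc (f k)) z) := by
  intro t
  induction t with
  | nil => intro a z; rfl
  | cons y t ih => intro a z; simp only [List.foldl_cons, min_assoc, ih]

lemma diag_getD (is : List Nat) :
    ∀ (d : PySem.Dict (Nat × Nat) Int) (key : Nat × Nat),
      d.getD key 0 = 0 →
      ((is.foldl (fun d i => d.insert (i, i) 0) d).getD key 0 = 0) := by
  induction is with
  | nil => intro d key h; exact h
  | cons i is ih =>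
    intro d key h
    simp only [List.foldl_cons]
    apply ih
    by_cases hk : key = (i, i)
    · subst hk; simp [PySem.Dict.getD_insert_self]
    · rw [PySem.Dict.getD_insert_of_ne _ _ _ hk]
      exact h

-- one pass of the inner loop (fixed length L): fills every (lo, lo + L)
lemma inner_loop (arr : List Int) (N L : Nat) (hL : 1 ≤ L) :
    ∀ (los : List Nat) (d : PySem.Dict (Nat × Nat) Int),
      (∀ lo hi, lo ≤ hi → hi < N → (hi - lo < L ∨ (hi - lo = L ∧ lo ∉ los)) →
        d.getD (lo, hi) 0 = Gn arr N lo hi) →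
      (∀ lo hi, lo ≤ hi → hi < N → hi - lo ≤ L →
        (los.foldl (fun d lo =>
          let hi := lo + L
          let ret :=
            if arr.getD hi 0 = arr.getD (hi - 1) 0 then d.getD (lo, hi - 1) 0
            else if arr.getD lo 0 = arr.getD (lo + 1) 0 then d.getD (lo + 1, hi) 0
            else
              let ts := (List.range' lo (hi - lo)).map (fun k =>
                d.getD (lo, k) 0 + d.getD (k + 1, hi) 0 +
                  (if arr.getD lo 0 ≠ arr.getD (k + 1) 0 then (1 : Int) else 0))
              min ((PySem.List.min? ts (fun y => y)).getD 0) 9999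
          d.insert (lo, hi) ret) d).getD (lo, hi) 0 = Gn arr N lo hi) := by
  intro los
  induction los with
  | nil =>
    intro d hd lo hi h1 h2 h3
    refine hd lo hi h1 h2 ?_
    rcases Nat.lt_or_ge (hi - lo) L with h | h
    · exact Or.inl h
    · exact Or.inr ⟨by omega, by simp⟩
  | cons l los ihl =>
    intro d hd lo hi h1 h2 h3
    simp only [List.foldl_cons]
    refine ihl _ ?_ lo hi h1 h2 h3
    intro lo' hi' g1 g2 g3
    by_cases hrange : l + L < N
    · by_cases hkey : (lo', hi') = (l, l + L)
      · -- the freshly inserted entry: the computed ret equals Gn l (l + L)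
        obtain ⟨rfl, rfl⟩ : lo' = l ∧ hi' = l + L := Prod.mk.injEq .. ▸ hkey
        rw [PySem.Dict.getD_insert_self]
        rw [Gn_eq arr N lo' (lo' + L) (by omega), if_neg (by omega : ¬ lo' = lo' + L)]
        by_cases c1 : arr.getD (lo' + L) 0 = arr.getD (lo' + L - 1) 0
        · rw [if_pos c1,
              if_pos (show 0 < lo' + L ∧ arr.getD (lo' + L) 0 = arr.getD (lo' + L - 1) 0 from
                ⟨by omega, c1⟩)]
          exact hd lo' (lo' + L - 1) (by omega) (by omega) (Or.inl (by omega))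
        · rw [if_neg c1,
              if_neg (show ¬ (0 < lo' + L ∧ arr.getD (lo' + L) 0 = arr.getD (lo' + L - 1) 0) from
                fun h => c1 h.2)]
          by_cases c2 : arr.getD lo' 0 = arr.getD (lo' + 1) 0
          · rw [if_pos c2,
                if_pos (show lo' + 1 < N ∧ arr.getD lo' 0 = arr.getD (lo' + 1) 0 from
                  ⟨by omega, c2⟩)]
            exact hd (lo' + 1) (lo' + L) (by omega) (by omega) (Or.inl (by omega))
          · rw [if_neg c2,
                if_neg (show ¬ (lo' + 1 < N ∧ arr.getD lo' 0 = arr.getD (lo' + 1) 0) from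
                  fun h => c2 h.2)]
            -- else branch: B's min over the terms list = A's seeded foldl-min
            have hmap : ((List.range' lo' (lo' + L - lo')).map (fun k =>
                  d.getD (lo', k) 0 + d.getD (k + 1, lo' + L) 0 +
                    (if arr.getD lo' 0 ≠ arr.getD (k + 1) 0 then (1 : Int) else 0))) =
                (List.range' lo' (lo' + L - lo')).map (fun k =>
                  Gn arr N lo' k + Gn arr N (k + 1) (lo' + L) +
                    (if arr.getD lo' 0 ≠ arr.getD (k + 1) 0 then (1 : Int) else 0)) := by
              apply List.map_congr_left
              intro k hk
              rw [List.mem_range'] at hk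
              rw [hd lo' k (by omega) (by omega) (Or.inl (by omega)),
                  hd (k + 1) (lo' + L) (by omega) (by omega) (Or.inl (by omega))]
            have hsplit : List.range' lo' (lo' + L - lo') =
                lo' :: List.range' (lo' + 1) (L - 1) := by
              obtain ⟨L', rfl⟩ : ∃ L', L = L' + 1 := ⟨L - 1, by omega⟩
              have hn : lo' + (L' + 1) - lo' = L' + 1 := by omega
              rw [hn, List.range'_succ]
              simp
            rw [hmap, hsplit, List.map_cons, PySem.List.min?_id_cons, Option.getD_some,
                List.foldl_cons, List.foldl_map, foldl_min_comm]
            exact min_comm _ _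
      · rw [PySem.Dict.getD_insert_of_ne _ _ _ hkey]
        apply hd lo' hi' g1 g2
        rcases g3 with g | ⟨g, gn⟩
        · exact Or.inl g
        · refine Or.inr ⟨g, fun hmem => ?_⟩
          rcases List.mem_cons.mp hmem with rfl | hmem'
          · exact hkey (by rw [Prod.mk.injEq]; omega)
          · exact gn hmem'
    · -- l + L ≥ N: the inserted key can never be queried
      have hne : (lo', hi') ≠ (l, l + L) := by
        rw [Ne, Prod.mk.injEq]
        omega
      rw [PySem.Dict.getD_insert_of_ne _ _ _ hne]
      apply hd lo' hi' g1 g2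
      rcases g3 with g | ⟨g, gn⟩
      · exact Or.inl g
      · refine Or.inr ⟨g, fun hmem => ?_⟩
        rcases List.mem_cons.mp hmem with rfl | hmem'
        · omega
        · exact gn hmem'

-- the outer loop over lengths s, s+1, …, s+m-1
lemma outer_loop (arr : List Int) (N : Nat) :
    ∀ (m s : Nat) (d : PySem.Dict (Nat × Nat) Int), 1 ≤ s →
      (∀ lo hi, lo ≤ hi → hi < N → hi - lo ≤ s - 1 → d.getD (lo, hi) 0 = Gn arr N lo hi) →
      (∀ lo hi, lo ≤ hi → hi < N → hi - lo ≤ s + m - 1 →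
        ((List.range' s m).foldl (fun d L =>
          (List.range (N - L)).foldl (fun d lo =>
            let hi := lo + L
            let ret :=
              if arr.getD hi 0 = arr.getD (hi - 1) 0 then d.getD (lo, hi - 1) 0
              else if arr.getD lo 0 = arr.getD (lo + 1) 0 then d.getD (lo + 1, hi) 0
              else
                let ts := (List.range' lo (hi - lo)).map (fun k =>
                  d.getD (lo, k) 0 + d.getD (k + 1, hi) 0 +
                    (if arr.getD lo 0 ≠ arr.getD (k + 1) 0 then (1 : Int) else 0))
                min ((PySem.List.min? ts (fun y => y)).getD 0) 9999
            d.insert (lo, hi) ret) d) d).getD (lo, hi) 0 = Gn arr N lo hi) := by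
  intro m
  induction m with
  | zero =>
    intro s d hs hd lo hi h1 h2 h3
    exact hd lo hi h1 h2 (by omega)
  | succ m ihm =>
    intro s d hs hd lo hi h1 h2 h3
    rw [List.range'_succ, List.foldl_cons]
    refine ihm (s + 1) _ (by omega) ?_ lo hi h1 h2 (by omega)
    intro lo' hi' g1 g2 g3
    refine inner_loop arr N s hs (List.range (N - s)) d ?_ lo' hi' g1 g2 (by omega)
    intro lo'' hi'' f1 f2 f3
    rcases f3 with f | ⟨f, fn⟩
    · exact hd lo'' hi'' f1 f2 (by omega)
    · exfalso
      rw [List.mem_range] at fn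
      omega

lemma min_count_alt_eq_Gn (arr : List Int) (h : arr ≠ []) :
    min_count_alt arr = Gn arr arr.length 0 (arr.length - 1) := by
  have hN : 0 < arr.length := List.length_pos_iff.mpr h
  unfold min_count_alt
  refine outer_loop arr arr.length (arr.length - 1) 1 _ (by omega) ?_ 0 (arr.length - 1)
    (by omega) (by omega) (by omega)
  intro lo hi h1 h2 h3
  have hlo : lo = hi := by omega
  subst hlo
  have hdiag : ((List.range arr.length).foldl
      (fun d i => d.insert (i, i) (0 : Int))
      (PySem.Dict.empty : PySem.Dict (Nat × Nat) Int)).getD (lo, lo) 0 = 0 := by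
    apply diag_getD
    rfl
  rw [hdiag, Gn_eq arr arr.length lo lo le_rfl, if_pos rfl]

-- ===== VERDICT (by name: the statement is the Claim_ definition above) =====
theorem min_count_spec : Claim_equal_min_count := by
  intro arr _ hpre
  unfold Spec_min_count
  rw [min_count_eq_Gn arr hpre, min_count_alt_eq_Gn arr hpre]
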